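-- pv_equiv track=rewrite | github.com/mohammadfaiizan/ProjectI | DSA/Problem/Graph/11_Network_Flow_Min_Cut/2123_Minimum_Operations_to_Remove_Adjacent_Ones_in_Matrix.py | minimumOperations_greedy_local
-- ===== SOURCE A (Python) =====
-- from typing import List, Dict, Set, Tuple, Optional
--
-- def minimumOperations_greedy_local(grid: List[List[int]]) -> int:
--     """
--     Approach 1: Greedy Local Optimization
--
--     Greedily remove 1s that have the most adjacent 1s.
--
--     Time: O(m * n * (m + n))
--     Space: O(m * n)
--     """
--     if not grid or not grid[0]:
--         return 0
--
--     m, n = len(grid), len(grid[0])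
--     grid_copy = [row[:] for row in grid]  # Make a copy
--     operations = 0
--
--     def count_adjacent_ones(r: int, c: int) -> int:
--         """Count adjacent 1s for cell (r, c)"""
--         if grid_copy[r][c] == 0:
--             return 0
--
--         count = 0
--         directions = [(0, 1), (1, 0), (0, -1), (-1, 0)]
--
--         for dr, dc in directions:
--             nr, nc = r + dr, c + dc
--             if 0 <= nr < m and 0 <= nc < n and grid_copy[nr][nc] == 1:
--                 count += 1
--
--         return count
--
--     while True:
--         # Find cell with maximum adjacent 1s
--         max_adjacent = 0
--         best_cell = None
--
--         for i in range(m):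
--             for j in range(n):
--                 if grid_copy[i][j] == 1:
--                     adjacent_count = count_adjacent_ones(i, j)
--                     if adjacent_count > max_adjacent:
--                         max_adjacent = adjacent_count
--                         best_cell = (i, j)
--
--         if max_adjacent == 0:
--             break  # No more adjacent 1s
--
--         # Remove the best cell
--         r, c = best_cell
--         grid_copy[r][c] = 0
--         operations += 1
--
--     return operations
-- ===== SOURCE B (Python) =====
-- from typing import List
--
-- def minimumOperations_greedy_local(grid: List[List[int]]) -> int:
--     """Alternative: build the live 1-cell index with adjacency counts once,
--     then keep it incrementally up to date instead of rescanning the grid and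
--     recounting neighbours every iteration."""
--     if not grid or not grid[0]:
--         return 0
--
--     m, n = len(grid), len(grid[0])
--     ones = [(i, j) for i in range(m) for j in range(n) if grid[i][j] == 1]
--     live = set(ones)
--     counts = {}
--     for (i, j) in ones:
--         c = 0
--         for nb in ((i, j + 1), (i + 1, j), (i, j - 1), (i - 1, j)):
--             if nb in live:
--                 c += 1
--         counts[(i, j)] = c
--
--     operations = 0
--     while counts:
--         best = None
--         bc = 0
--         for cell, c in counts.items():
--             if c > bc:
--                 bc = c
--                 best = cell
--         if bc == 0:
--             break
--         del counts[best]
--         i, j = best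
--         for nb in ((i, j + 1), (i + 1, j), (i, j - 1), (i - 1, j)):
--             if nb in counts:
--                 counts[nb] -= 1
--         operations += 1
--     return operations
-- ===== Notes on version B (the rewrite author's own statement) =====
-- stated objective: alternative
-- what changed: Instead of rescanning the whole grid and recounting each cell's adjacent 1s on every iteration, B builds an insertion-ordered map from live 1-cells to their adjacent-1 counts once and keeps it incrementally up to date (delete the removed cell, decrement its live neighbours), picking each maximum from that map alone.
import Mathlib
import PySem

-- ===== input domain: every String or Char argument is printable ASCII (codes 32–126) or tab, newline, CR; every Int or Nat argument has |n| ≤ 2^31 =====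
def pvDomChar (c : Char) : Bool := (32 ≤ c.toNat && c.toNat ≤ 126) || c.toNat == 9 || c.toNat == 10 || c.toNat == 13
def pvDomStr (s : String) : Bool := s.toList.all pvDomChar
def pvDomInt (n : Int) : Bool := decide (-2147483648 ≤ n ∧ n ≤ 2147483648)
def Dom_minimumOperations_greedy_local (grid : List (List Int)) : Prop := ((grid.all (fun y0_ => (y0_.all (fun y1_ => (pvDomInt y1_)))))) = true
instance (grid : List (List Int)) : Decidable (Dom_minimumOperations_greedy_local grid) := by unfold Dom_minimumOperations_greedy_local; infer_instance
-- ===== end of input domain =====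

-- B replaces A's per-iteration full-grid rescan with an incrementally maintained
-- map from live 1-cells to adjacent-1 counts (objective: alternative algorithm, same cost).

-- ===== PORT A =====
-- grid[r][c] (total form; Pre_ keeps the indices A uses in range)
def pvCell (g : List (List Int)) (r c : Int) : Int :=
  PySem.List.pyGetD (PySem.List.pyGetD g r []) c 0

-- grid[r][c] = v
def pvSetCell (g : List (List Int)) (r c v : Int) : List (List Int) :=
  PySem.List.pySetD g r (PySem.List.pySetD (PySem.List.pyGetD g r []) c v)

def pvDirections : List (Int × Int) := [(0, 1), (1, 0), (0, -1), (-1, 0)]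

-- A's count_adjacent_ones
def pvCountAdj (g : List (List Int)) (m n r c : Int) : Int :=
  if pvCell g r c = 0 then 0
  else pvDirections.foldl (fun count d =>
    if 0 ≤ r + d.1 ∧ r + d.1 < m ∧ 0 ≤ c + d.2 ∧ c + d.2 < n ∧ pvCell g (r + d.1) (c + d.2) = 1
    then count + 1 else count) 0

-- A's per-iteration scan for (max_adjacent, best_cell)
def pvScan (g : List (List Int)) (m n : Int) : Int × Option (Int × Int) :=
  (PySem.List.pyRange 0 m 1).foldl (fun acc i =>
    (PySem.List.pyRange 0 n 1).foldl (fun acc2 j =>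
      if pvCell g i j = 1 then
        let a := pvCountAdj g m n i j
        if acc2.1 < a then (a, some (i, j)) else acc2
      else acc2) acc) (0, none)

-- termination measure for A's while-loop: total number of 1 entries
def pvOnesMeasure (g : List (List Int)) : Nat := (g.map (fun row => row.count 1)).sum

-- loop-shape facts cited by the ports' decreasing_by proofs
theorem pvScan_some (g : List (List Int)) (m n : Int) :
    ∀ p : Int × Int, (pvScan g m n).2 = some p →
      0 ≤ p.1 ∧ 0 ≤ p.2 ∧ pvCell g p.1 p.2 = 1 := by
  unfold pvScan
  refine List.foldlRecOn (motive := fun acc : Int × Option (Int × Int) => ∀ p : Int × Int, acc.2 = some p → 0 ≤ p.1 ∧ 0 ≤ p.2 ∧ pvCell g p.1 p.2 = 1) _ _ ?_ ?_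
  · intro p hp; simp at hp
  · intro acc hacc i hi
    have hi' : 0 ≤ i := (PySem.List.mem_pyRange_one.1 hi).1
    refine List.foldlRecOn (motive := fun acc : Int × Option (Int × Int) => ∀ p : Int × Int, acc.2 = some p → 0 ≤ p.1 ∧ 0 ≤ p.2 ∧ pvCell g p.1 p.2 = 1) _ _ ?_ ?_
    · exact hacc
    · intro acc2 hacc2 j hj
      have hj' : 0 ≤ j := (PySem.List.mem_pyRange_one.1 hj).1
      intro p hp
      by_cases hc : pvCell g i j = 1
      · simp only [hc, if_true] at hp
        split at hp
        · simp only at hp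
          cases hp
          exact ⟨hi', hj', hc⟩
        · exact hacc2 p hp
      · simp only [hc, if_false] at hp
        exact hacc2 p hp

theorem pv_sum_set_lt {l : List Nat} : ∀ {a : Nat} {x : Nat}, ∀ (ha : a < l.length), x < l[a] → (l.set a x).sum < l.sum := by
  induction l with
  | nil => intro a x ha; simp at ha
  | cons h t ih =>
    intro a x ha hx
    cases a with
    | zero => simp at hx ⊢; omega
    | succ a =>
      simp only [List.set, List.sum_cons]
      have := ih (a := a) (by simpa using ha) (by simpa using hx)
      omega

theorem pv_count_set_lt {row : List Int} : ∀ {b : Nat}, ∀ (hb : b < row.length), row[b] = 1 → (row.set b 0).count 1 < row.count 1 := by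
  induction row with
  | nil => intro b hb; simp at hb
  | cons h t ih =>
    intro b hb h1
    cases b with
    | zero =>
      simp_all
    | succ b =>
      simp only [List.set, List.count_cons]
      have := ih (b := b) (by simpa using hb) (by simpa using h1)
      split <;> omega

theorem pvMeasure_dec (g : List (List Int)) (r c : Int)
    (h1 : pvCell g r c = 1) (hr : 0 ≤ r) (hc : 0 ≤ c) :
    pvOnesMeasure (pvSetCell g r c 0) < pvOnesMeasure g := by
  unfold pvCell at h1
  unfold pvSetCell pvOnesMeasure
  rw [← Int.toNat_of_nonneg hr, ← Int.toNat_of_nonneg hc] at h1 ⊢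
  rw [PySem.List.pyGetD_natCast] at h1 ⊢
  rw [PySem.List.pyGetD_natCast] at h1
  set a := r.toNat
  set b := c.toNat
  have ha : a < g.length := by
    by_contra hle
    rw [List.getD_eq_default (l := g) _ (by omega)] at h1
    simp at h1
  have hrow : g.getD a [] = g[a] := List.getD_eq_getElem _ _ ha
  rw [hrow] at h1 ⊢
  have hb : b < (g[a]).length := by
    by_contra hle
    rw [List.getD_eq_default _ _ (by omega)] at h1
    omega
  rw [List.getD_eq_getElem _ _ hb] at h1
  rw [PySem.List.pySetD_of_nonneg _ _ (Int.natCast_nonneg _),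
      PySem.List.pySetD_of_nonneg _ _ (Int.natCast_nonneg _)]
  simp only [Int.toNat_natCast]
  rw [List.map_set]
  apply pv_sum_set_lt (by simpa using ha)
  simp only [List.getElem_map]
  exact pv_count_set_lt hb h1

-- A's while-loop (max_adjacent is the scan's first component, best_cell its second)
def pvLoopA (g : List (List Int)) (m n ops : Int) : Int :=
  if (pvScan g m n).1 = 0 then ops
  else
    match hb : (pvScan g m n).2 with
    | none => ops
    | some (r, c) => pvLoopA (pvSetCell g r c 0) m n (ops + 1)
termination_by pvOnesMeasure g
decreasing_by
  have h := pvScan_some g m n (r, c) hb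
  exact pvMeasure_dec g r c h.2.2 h.1 h.2.1

def minimumOperations_greedy_local (grid : List (List Int)) : Int :=
  if grid = [] ∨ grid.headD [] = [] then 0
  else pvLoopA grid (grid.length : Int) ((grid.headD []).length : Int) 0

-- ===== PORT B =====
-- the four neighbours of a cell, in B's tuple order
def pvNbrs (p : Int × Int) : List (Int × Int) :=
  [(p.1, p.2 + 1), (p.1 + 1, p.2), (p.1, p.2 - 1), (p.1 - 1, p.2)]

-- B's comprehension: coordinates of the 1-cells, row-major
def pvOnesList (g : List (List Int)) (m n : Int) : List (Int × Int) :=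
  (PySem.List.pyRange 0 m 1).flatMap (fun i =>
    ((PySem.List.pyRange 0 n 1).filter (fun j => pvCell g i j == 1)).map (fun j => (i, j)))

-- B's initial counts dict: every live cell mapped to its number of live neighbours
def pvInitCounts (g : List (List Int)) (m n : Int) : PySem.Dict (Int × Int) Int :=
  let ones := pvOnesList g m n
  let live : PySem.Set (Int × Int) := PySem.Set.ofList ones
  ones.foldl (fun d p =>
    d.insert p ((pvNbrs p).foldl (fun c nb => if live.contains nb then c + 1 else c) (0 : Int)))
    PySem.Dict.empty

-- B's max-scan over counts.items()
def pvBestOf (items : List ((Int × Int) × Int)) : Int × Option (Int × Int) :=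
  items.foldl (fun acc it => if acc.1 < it.2 then (it.2, some it.1) else acc) (0, none)

theorem pvBestOf_mem (items : List ((Int × Int) × Int)) :
    ∀ p, (pvBestOf items).2 = some p → ∃ v, (p, v) ∈ items := by
  unfold pvBestOf
  refine List.foldlRecOn (motive := fun acc : Int × Option (Int × Int) => ∀ p, acc.2 = some p → ∃ v, (p, v) ∈ items) _ _ ?_ ?_
  · intro p hp; simp at hp
  · intro acc hacc it hit p hp
    split at hp
    · simp only at hp
      cases hp
      exact ⟨it.2, hit⟩
    · exact hacc p hp

theorem pv_fold_dec_length (ds : List (Int × Int)) :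
    ∀ d : PySem.Dict (Int × Int) Int,
      ((ds.foldl (fun d nb => if d.contains nb then d.modify nb 0 (· - 1) else d) d).size = d.size) := by
  induction ds with
  | nil => intro d; rfl
  | cons a t ih =>
    intro d
    simp only [List.foldl_cons]
    by_cases hcond : d.contains a
    · rw [if_pos hcond, ih]
      simp [PySem.Dict.size, PySem.Dict.modify, PySem.Dict.items_insert_of_contains _ _ hcond]
    · rw [if_neg hcond]
      exact ih d

theorem pvStep_size (counts : PySem.Dict (Int × Int) Int) (p : Int × Int)
    (hp : ∃ v, (p, v) ∈ counts.items) :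
    ((pvNbrs p).foldl (fun d nb => if d.contains nb then d.modify nb 0 (· - 1) else d)
      (counts.erase p)).size < counts.size := by
  rw [pv_fold_dec_length]
  obtain ⟨v, hv⟩ := hp
  simp only [PySem.Dict.size, PySem.Dict.erase]
  apply List.length_filter_lt_length_iff_exists.2
  exact ⟨(p, v), hv, by simp⟩

-- B's while-loop (bc is the items-scan's first component, best its second)
def pvLoopB (counts : PySem.Dict (Int × Int) Int) (ops : Int) : Int :=
  if counts.size = 0 then ops
  else
    if (pvBestOf counts.items).1 = 0 then ops
    else
      match hb : (pvBestOf counts.items).2 with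
      | none => ops
      | some p =>
        pvLoopB ((pvNbrs p).foldl (fun d nb => if d.contains nb then d.modify nb 0 (· - 1) else d)
          (counts.erase p)) (ops + 1)
termination_by counts.size
decreasing_by
  exact pvStep_size counts p (pvBestOf_mem counts.items p hb)

def minimumOperations_greedy_local_alt (grid : List (List Int)) : Int :=
  if grid = [] ∨ grid.headD [] = [] then 0
  else pvLoopB (pvInitCounts grid (grid.length : Int) ((grid.headD []).length : Int)) 0

-- ===== PRECONDITION & SPEC =====
-- Pre_ excludes exactly the grids on which Python A raises IndexError: a nonempty grid with a
-- nonempty first row whose later rows are shorter than the first (A indexes every row up to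
-- len(grid[0])-1).  A returns on every input satisfying Pre_.
def Pre_minimumOperations_greedy_local (grid : List (List Int)) : Prop :=
  ∀ row ∈ grid, (grid.headD []).length ≤ row.length
instance (grid : List (List Int)) : Decidable (Pre_minimumOperations_greedy_local grid) := by
  unfold Pre_minimumOperations_greedy_local; infer_instance

def pvWitness_minimumOperations_greedy_local : List (List Int) := [[1, 1], [0, 1]]

def Spec_minimumOperations_greedy_local (grid : List (List Int)) (out : Int) : Prop := out = minimumOperations_greedy_local_alt grid
instance (grid : List (List Int)) (out : Int) : Decidable (Spec_minimumOperations_greedy_local grid out) := by unfold Spec_minimumOperations_greedy_local; infer_instance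

-- ===== CLAIM (what is proved, stated in full; the proofs are below) =====
def Claim_equal_minimumOperations_greedy_local : Prop := ∀ (grid : List (List Int)), Dom_minimumOperations_greedy_local grid → Pre_minimumOperations_greedy_local grid → Spec_minimumOperations_greedy_local grid (minimumOperations_greedy_local grid)

-- ===== LEMMAS AND PROOFS =====

-- the predicate "q is a live 1-cell of the m×n board"
def pvLiveB (g : List (List Int)) (m n : Int) (q : Int × Int) : Bool :=
  decide (0 ≤ q.1 ∧ q.1 < m ∧ 0 ≤ q.2 ∧ q.2 < n ∧ pvCell g q.1 q.2 = 1)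

-- reference count of live neighbours
def pvAdjCnt (g : List (List Int)) (m n : Int) (p : Int × Int) : Int :=
  (pvNbrs p).foldl (fun c nb => if pvLiveB g m n nb then c + 1 else c) 0

-- the canonical counts dict of a board
def pvCanon (g : List (List Int)) (m n : Int) : PySem.Dict (Int × Int) Int :=
  PySem.Dict.mk ((pvOnesList g m n).map (fun p => (p, pvAdjCnt g m n p)))

theorem pvMem_onesList (g : List (List Int)) (m n : Int) (q : Int × Int) :
    q ∈ pvOnesList g m n ↔ pvLiveB g m n q = true := by
  obtain ⟨i, j⟩ := q
  simp [pvOnesList, pvLiveB, List.mem_flatMap, List.mem_filter,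
    PySem.List.mem_pyRange_one]
  tauto

theorem pv_nodup_tagged (F : Int → List Int) :
    ∀ (l : List Int), l.Nodup → (∀ i, (F i).Nodup) →
      (l.flatMap (fun i => (F i).map (fun j => (i, j)))).Nodup := by
  intro l
  induction l with
  | nil => simp
  | cons a t ih =>
    intro hnd hF
    rcases List.nodup_cons.1 hnd with ⟨ha, ht⟩
    rw [List.flatMap_cons, List.nodup_append]
    refine ⟨(hF a).map (by intro x y h; simpa using h), ih ht hF, ?_⟩
    intro x hx y hy
    simp only [List.mem_map] at hx
    obtain ⟨j, -, rfl⟩ := hx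
    simp only [List.mem_flatMap, List.mem_map] at hy
    obtain ⟨i', hi', j', -, rfl⟩ := hy
    intro hcon
    obtain ⟨h1, -⟩ := Prod.mk.injEq .. ▸ hcon
    exact ha (h1 ▸ hi')

theorem pvOnesList_nodup (g : List (List Int)) (m n : Int) : (pvOnesList g m n).Nodup := by
  unfold pvOnesList
  exact pv_nodup_tagged _ _ (PySem.List.nodup_pyRange_one 0 m)
    (fun i => (PySem.List.nodup_pyRange_one 0 n).filter _)

theorem pv_foldl_insert_fresh (f : (Int × Int) → Int) :
    ∀ (l : List (Int × Int)) (acc : PySem.Dict (Int × Int) Int),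
      l.Nodup → (∀ k ∈ l, acc.contains k = false) →
      l.foldl (fun d p => d.insert p (f p)) acc
        = PySem.Dict.mk (acc.items ++ l.map (fun p => (p, f p))) := by
  intro l
  induction l with
  | nil => intro acc _ _; simp
  | cons a t ih =>
    intro acc hnd hfresh
    rcases List.nodup_cons.1 hnd with ⟨ha, ht⟩
    rw [List.foldl_cons]
    have hins : (acc.insert a (f a)).items = acc.items ++ [(a, f a)] :=
      PySem.Dict.items_insert_of_not_contains _ _ (by simp [hfresh a (by simp)])
    rw [ih (acc.insert a (f a)) ht ?_]
    · apply PySem.Dict.ext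
      simp [hins]
    · intro k hk
      rw [PySem.Dict.contains_insert]
      have : (k == a) = false := by simp; rintro rfl; exact ha hk
      simp [this, hfresh k (by simp [hk])]

theorem pvInitCounts_eq (g : List (List Int)) (m n : Int) :
    pvInitCounts g m n = pvCanon g m n := by
  unfold pvInitCounts
  dsimp only
  have hcontains : ∀ nb, (PySem.Set.ofList (pvOnesList g m n)).contains nb = pvLiveB g m n nb := by
    intro nb
    rw [Bool.eq_iff_iff]
    simp only [PySem.Set.contains_iff, PySem.Set.mem_ofList, pvMem_onesList]
  simp only [hcontains]
  rw [pv_foldl_insert_fresh (fun p => (pvNbrs p).foldl (fun c nb => if pvLiveB g m n nb then c + 1 else c) (0 : Int))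
    (pvOnesList g m n) PySem.Dict.empty (pvOnesList_nodup g m n)
    (fun k _ => PySem.Dict.contains_empty k)]
  rfl

theorem pvCountAdj_eq (g : List (List Int)) (m n : Int) (q : Int × Int)
    (hc : pvCell g q.1 q.2 = 1) :
    pvCountAdj g m n q.1 q.2 = pvAdjCnt g m n q := by
  obtain ⟨r, c⟩ := q
  simp only at hc
  unfold pvCountAdj pvAdjCnt pvDirections pvNbrs
  rw [if_neg (by simp [hc])]
  simp [pvLiveB, sub_eq_add_neg]

theorem pvScan_eq (g : List (List Int)) (m n : Int) :
    pvScan g m n = pvBestOf (pvCanon g m n).items := by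
  unfold pvScan pvBestOf pvCanon
  rw [List.foldl_map]
  have hinner : ∀ (i : Int) (acc : Int × Option (Int × Int)),
      (PySem.List.pyRange 0 n 1).foldl (fun acc2 j =>
        if pvCell g i j = 1 then
          let a := pvCountAdj g m n i j
          if acc2.1 < a then (a, some (i, j)) else acc2
        else acc2) acc
      = ((PySem.List.pyRange 0 n 1).map (fun j => (i, j))).foldl (fun acc2 q =>
          if pvCell g q.1 q.2 = 1 then
            let a := pvCountAdj g m n q.1 q.2
            if acc2.1 < a then (a, some q) else acc2
          else acc2) acc := by
    intro i acc; rw [List.foldl_map]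
  simp only [hinner]
  rw [← List.foldl_flatMap]
  rw [List.foldl_ext _ (fun (acc : Int × Option (Int × Int)) (q : Int × Int) =>
        if (pvCell g q.1 q.2 == 1) = true then
          (let a := pvCountAdj g m n q.1 q.2
           if acc.1 < a then (a, some q) else acc)
        else acc) _
      (by intro acc q _; by_cases h : pvCell g q.1 q.2 = 1 <;> simp [h])]
  rw [← List.foldl_filter]
  rw [List.filter_flatMap]
  simp only [List.filter_map, Function.comp_def]
  apply PySem.List.foldl_congr_mem
  intro acc q hq
  have hq1 : pvCell g q.1 q.2 = 1 := by
    have h := (pvMem_onesList g m n q).1 hq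
    simp [pvLiveB] at h
    exact h.2.2.2.2
  rw [pvCountAdj_eq g m n q hq1]

theorem pvNbrs_nodup (p : Int × Int) : (pvNbrs p).Nodup := by
  obtain ⟨a, b⟩ := p
  simp [pvNbrs, Prod.mk.injEq]
  omega

theorem pvNbrs_symm (p q : Int × Int) : p ∈ pvNbrs q ↔ q ∈ pvNbrs p := by
  obtain ⟨a, b⟩ := p; obtain ⟨c, d⟩ := q
  simp [pvNbrs, Prod.mk.injEq]
  omega

theorem pv_getD_set {α : Type} (l : List α) (i j : Nat) (x d : α) (hi : i < l.length) :
    (l.set i x).getD j d = if i = j then x else l.getD j d := by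
  rw [List.getD_eq_getElem?_getD, List.getElem?_set]
  by_cases h : i = j
  · subst h; simp [hi]
  · simp [h, List.getD_eq_getElem?_getD]

theorem pvCell_set (g : List (List Int)) (pr pc : Int)
    (h1 : pvCell g pr pc = 1) (hpr : 0 ≤ pr) (hpc : 0 ≤ pc)
    (qr qc : Int) (hqr : 0 ≤ qr) (hqc : 0 ≤ qc) :
    pvCell (pvSetCell g pr pc 0) qr qc
      = if qr = pr ∧ qc = pc then 0 else pvCell g qr qc := by
  unfold pvCell at h1 ⊢
  unfold pvSetCell
  rw [← Int.toNat_of_nonneg hpr, ← Int.toNat_of_nonneg hpc] at h1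
  rw [PySem.List.pyGetD_natCast] at h1
  rw [PySem.List.pyGetD_natCast] at h1
  have ha : pr.toNat < g.length := by
    by_contra hle
    rw [List.getD_eq_default (l := g) _ (by omega)] at h1
    simp at h1
  have hrow : g.getD pr.toNat [] = g[pr.toNat] := List.getD_eq_getElem _ _ ha
  rw [hrow] at h1
  have hb : pc.toNat < (g[pr.toNat]).length := by
    by_contra hle
    rw [List.getD_eq_default _ _ (by omega)] at h1
    omega
  rw [PySem.List.pySetD_of_nonneg _ _ hpc, PySem.List.pySetD_of_nonneg _ _ hpr]
  rw [show PySem.List.pyGetD g pr [] = g[pr.toNat] by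
        conv_lhs => rw [← Int.toNat_of_nonneg hpr]
        rw [PySem.List.pyGetD_natCast, hrow]]
  rw [show (PySem.List.pyGetD (g.set pr.toNat (g[pr.toNat].set pc.toNat 0)) qr []) =
        (g.set pr.toNat (g[pr.toNat].set pc.toNat 0)).getD qr.toNat [] by
        conv_lhs => rw [← Int.toNat_of_nonneg hqr]
        rw [PySem.List.pyGetD_natCast]]
  rw [pv_getD_set _ _ _ _ _ ha]
  by_cases hq1 : pr.toNat = qr.toNat
  · rw [if_pos hq1]
    rw [show (PySem.List.pyGetD (g[pr.toNat].set pc.toNat 0) qc 0) =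
          (g[pr.toNat].set pc.toNat 0).getD qc.toNat 0 by
          conv_lhs => rw [← Int.toNat_of_nonneg hqc]
          rw [PySem.List.pyGetD_natCast]]
    rw [pv_getD_set _ _ _ _ _ hb]
    by_cases hq2 : pc.toNat = qc.toNat
    · rw [if_pos hq2, if_pos ⟨by omega, by omega⟩]
    · rw [if_neg hq2, if_neg (by omega)]
      rw [← Int.toNat_of_nonneg hqr, ← Int.toNat_of_nonneg hqc,
        PySem.List.pyGetD_natCast, PySem.List.pyGetD_natCast, ← hq1, hrow]
      rw [Int.toNat_natCast]
  · rw [if_neg hq1, if_neg (by omega)]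
    rw [← Int.toNat_of_nonneg hqr, ← Int.toNat_of_nonneg hqc,
      PySem.List.pyGetD_natCast, PySem.List.pyGetD_natCast]
    rw [PySem.List.pyGetD_natCast]
    norm_num
    rw [max_eq_left hqr]

theorem pvLiveB_set (g : List (List Int)) (m n : Int) (p : Int × Int)
    (hp : pvLiveB g m n p = true) (nb : Int × Int) :
    pvLiveB (pvSetCell g p.1 p.2 0) m n nb = (pvLiveB g m n nb && !(nb == p)) := by
  simp only [pvLiveB, decide_eq_true_eq] at hp
  obtain ⟨hp1, hp2, hp3, hp4, hp5⟩ := hp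
  by_cases hb : 0 ≤ nb.1 ∧ nb.1 < m ∧ 0 ≤ nb.2 ∧ nb.2 < n
  · obtain ⟨h1, h2, h3, h4⟩ := hb
    have hcs := pvCell_set g p.1 p.2 hp5 hp1 hp3 nb.1 nb.2 h1 h3
    by_cases heq : nb = p
    · subst heq
      rw [if_pos ⟨rfl, rfl⟩] at hcs
      simp [pvLiveB, hcs, h1, h2, h3, h4]
    · have hne : ¬(nb.1 = p.1 ∧ nb.2 = p.2) := by
        intro hcon; exact heq (Prod.ext hcon.1 hcon.2)
      rw [if_neg hne] at hcs
      simp [pvLiveB, hcs, heq]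
  · simp only [pvLiveB]
    rw [decide_eq_false (by tauto), decide_eq_false (by tauto)]
    simp

theorem pvOnesList_set (g : List (List Int)) (m n : Int) (p : Int × Int)
    (hp : pvLiveB g m n p = true) :
    pvOnesList (pvSetCell g p.1 p.2 0) m n
      = (pvOnesList g m n).filter (fun q => !(q == p)) := by
  have hp' := hp
  simp only [pvLiveB, decide_eq_true_eq] at hp'
  obtain ⟨hp1, hp2, hp3, hp4, hp5⟩ := hp'
  unfold pvOnesList
  rw [List.filter_flatMap]
  apply List.flatMap_congr
  intro i hi
  have hi0 : 0 ≤ i := (PySem.List.mem_pyRange_one.1 hi).1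
  rw [List.filter_map, List.filter_filter]
  congr 1
  apply List.filter_congr
  intro j hj
  have hj0 : 0 ≤ j := (PySem.List.mem_pyRange_one.1 hj).1
  have hcs := pvCell_set g p.1 p.2 hp5 hp1 hp3 i j hi0 hj0
  by_cases heq : (i, j) = p
  · have : i = p.1 ∧ j = p.2 := ⟨congrArg Prod.fst heq, congrArg Prod.snd heq⟩
    rw [if_pos this] at hcs
    simp [hcs, heq]
  · have hne : ¬(i = p.1 ∧ j = p.2) := by
      intro hcon
      exact heq (by obtain ⟨a, b⟩ := p; simp_all)
    rw [if_neg hne] at hcs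
    simp [hcs, heq]

theorem pv_mod_fold : ∀ (ds : List (Int × Int)), ds.Nodup →
    ∀ (l : List (Int × Int)) (v : (Int × Int) → Int), l.Nodup →
      ds.foldl (fun d nb => if d.contains nb then d.modify nb 0 (· - 1) else d)
        (PySem.Dict.mk (l.map (fun q => (q, v q))))
      = PySem.Dict.mk (l.map (fun q => (q, if q ∈ ds then v q - 1 else v q))) := by
  intro ds
  induction ds with
  | nil => intro _ l v _; simp
  | cons a t ih =>
    intro hnd l v hl
    rcases List.nodup_cons.1 hnd with ⟨ha, ht⟩
    rw [List.foldl_cons]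
    have hkeys : (PySem.Dict.mk (l.map (fun q => (q, v q)))).keys = l := by
      simp [PySem.Dict.keys, Function.comp_def]
    by_cases hmem : a ∈ l
    · rw [if_pos (by
        simp only [PySem.Dict.contains, List.any_eq_true]
        exact ⟨(a, v a), List.mem_map_of_mem (f := fun q => (q, v q)) hmem, by simp⟩)]
      have hgetD : (PySem.Dict.mk (l.map (fun q => (q, v q)))).getD a 0 = v a :=
        PySem.Dict.getD_of_mem_items _ (List.mem_map_of_mem (f := fun q => (q, v q)) hmem) (by rw [hkeys]; exact hl) 0
      have hmod : (PySem.Dict.mk (l.map (fun q => (q, v q)))).modify a 0 (· - 1)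
          = PySem.Dict.mk (l.map (fun q => (q, if q = a then v a - 1 else v q))) := by
        unfold PySem.Dict.modify
        rw [hgetD]
        apply PySem.Dict.ext
        rw [PySem.Dict.items_insert_of_contains _ _ (by
          simp only [PySem.Dict.contains, List.any_eq_true]
          exact ⟨(a, v a), List.mem_map_of_mem (f := fun q => (q, v q)) hmem, by simp⟩)]
        simp only [List.map_map]
        apply List.map_congr_left
        intro q hq
        by_cases hqa : q = a
        · subst hqa; simp
        · simp [hqa]
      rw [hmod, ih ht l _ hl]
      congr 1
      apply List.map_congr_left
      intro q hq
      by_cases hqa : q = a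
      · subst hqa
        simp [ha]
      · simp [hqa, List.mem_cons]
    · rw [if_neg (by
        simp only [PySem.Dict.contains, List.any_eq_true]
        push Not
        rintro ⟨q, w⟩ hqmem
        simp only [List.mem_map] at hqmem
        obtain ⟨q', hq', heq⟩ := hqmem
        obtain ⟨rfl, -⟩ := Prod.mk.injEq .. ▸ heq
        simp
        rintro rfl
        exact hmem hq')]
      rw [ih ht l v hl]
      congr 1
      apply List.map_congr_left
      intro q hq
      have hqa : q ≠ a := by rintro rfl; exact hmem hq
      simp [hqa, List.mem_cons]

theorem pvAdjCnt_set (g : List (List Int)) (m n : Int) (p : Int × Int)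
    (hp : pvLiveB g m n p = true) (q : Int × Int) :
    pvAdjCnt (pvSetCell g p.1 p.2 0) m n q
      = if q ∈ pvNbrs p then pvAdjCnt g m n q - 1 else pvAdjCnt g m n q := by
  unfold pvAdjCnt
  rw [PySem.List.foldl_count_if, PySem.List.foldl_count_if]
  simp only [zero_add]
  have hstep : List.countP (fun nb => pvLiveB (pvSetCell g p.1 p.2 0) m n nb) (pvNbrs q)
      = List.countP (fun nb => pvLiveB g m n nb && !(nb == p)) (pvNbrs q) := by
    apply List.countP_congr
    intro x hx
    simp only [pvLiveB_set g m n p hp x]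
  rw [hstep]
  by_cases hmem : p ∈ pvNbrs q
  · rw [if_pos ((pvNbrs_symm p q).1 hmem)]
    have hperm := List.perm_cons_erase hmem
    rw [hperm.countP_eq (fun nb => pvLiveB g m n nb && !(nb == p)),
        hperm.countP_eq (fun nb => pvLiveB g m n nb)]
    simp only [List.countP_cons, hp]
    have hnoerase : p ∉ (pvNbrs q).erase p := (pvNbrs_nodup q).not_mem_erase
    have hcong : List.countP (fun nb => pvLiveB g m n nb && !(nb == p)) ((pvNbrs q).erase p)
        = List.countP (fun nb => pvLiveB g m n nb) ((pvNbrs q).erase p) := by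
      apply List.countP_congr
      intro x hx
      have hxp : x ≠ p := by rintro rfl; exact hnoerase hx
      simp [hxp]
    rw [hcong]
    simp
  · rw [if_neg (fun hcon => hmem ((pvNbrs_symm p q).2 hcon))]
    congr 1
    apply List.countP_congr
    intro x hx
    have hxp : x ≠ p := by rintro rfl; exact hmem hx
    simp [hxp]

theorem pvCanon_step (g : List (List Int)) (m n : Int) (p : Int × Int)
    (hp : pvLiveB g m n p = true) :
    (pvNbrs p).foldl (fun d nb => if d.contains nb then d.modify nb 0 (· - 1) else d)
      ((pvCanon g m n).erase p) = pvCanon (pvSetCell g p.1 p.2 0) m n := by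
  have herase : (pvCanon g m n).erase p
      = PySem.Dict.mk (((pvOnesList g m n).filter (fun q => !(q == p))).map
          (fun q => (q, pvAdjCnt g m n q))) := by
    simp only [pvCanon, PySem.Dict.erase]
    rw [List.filter_map]
    rfl
  rw [herase,
    pv_mod_fold (pvNbrs p) (pvNbrs_nodup p) _ _ ((pvOnesList_nodup g m n).filter _)]
  unfold pvCanon
  rw [pvOnesList_set g m n p hp]
  congr 1
  apply List.map_congr_left
  intro q hq
  rw [pvAdjCnt_set g m n p hp q]

theorem pvLoop_eq (k : Nat) : ∀ (g : List (List Int)) (m n ops : Int),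
    pvOnesMeasure g ≤ k → pvLoopA g m n ops = pvLoopB (pvCanon g m n) ops := by
  induction k using Nat.strong_induction_on with
  | _ k IH =>
    intro g m n ops hk
    have hrec : ∀ r c : Int, pvLiveB g m n (r, c) = true →
        pvLoopA (pvSetCell g r c 0) m n (ops + 1)
          = pvLoopB (pvCanon (pvSetCell g r c 0) m n) (ops + 1) := by
      intro r c hlive
      have hlive' := hlive
      simp only [pvLiveB, decide_eq_true_eq] at hlive'
      have hdec : pvOnesMeasure (pvSetCell g r c 0) < pvOnesMeasure g :=
        pvMeasure_dec g r c hlive'.2.2.2.2 hlive'.1 hlive'.2.2.1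
      exact IH (pvOnesMeasure (pvSetCell g r c 0)) (by omega) _ m n (ops + 1) le_rfl
    have hlive_of_mem : ∀ (r c : Int) (v : Int),
        ((r, c), v) ∈ (pvCanon g m n).items → pvLiveB g m n (r, c) = true := by
      intro r c v hv
      apply (pvMem_onesList g m n (r, c)).1
      simp only [pvCanon, List.mem_map] at hv
      obtain ⟨q, hq, heq⟩ := hv
      obtain ⟨rfl, -⟩ := Prod.mk.injEq .. ▸ heq
      exact hq
    rw [pvLoopA, pvLoopB, pvScan_eq]
    by_cases hsz : (pvCanon g m n).size = 0
    · rw [if_pos hsz]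
      have hnil : (pvCanon g m n).items = [] := List.eq_nil_of_length_eq_zero hsz
      rw [hnil]
      simp [pvBestOf]
    · rw [if_neg hsz]
      by_cases hbc : (pvBestOf (pvCanon g m n).items).1 = 0
      · rw [if_pos hbc, if_pos hbc]
      · rw [if_neg hbc, if_neg hbc]
        split
        next hb =>
          split
          next => rfl
          next p hb2 => rw [hb] at hb2; cases hb2
        next r c hb =>
          have hlive : pvLiveB g m n (r, c) = true := by
            obtain ⟨v, hv⟩ := pvBestOf_mem _ (r, c) hb
            exact hlive_of_mem r c v hv
          split
          next hb2 => rw [hb] at hb2; cases hb2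
          next p hb2 =>
            rw [hb] at hb2
            cases hb2
            rw [pvCanon_step g m n (r, c) hlive]
            exact hrec r c hlive

-- ===== VERDICT (by name: the statement is the Claim_ definition above) =====
theorem minimumOperations_greedy_local_spec : Claim_equal_minimumOperations_greedy_local := by
  intro grid _ _
  unfold Spec_minimumOperations_greedy_local
  unfold minimumOperations_greedy_local minimumOperations_greedy_local_alt
  split
  · rfl
  · rw [pvInitCounts_eq, pvLoop_eq (pvOnesMeasure grid) grid _ _ 0 le_rfl]
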